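-- pv_equiv track=rewrite | github.com/shubham-kumar-10/Data_Structures_And_Algorithms | String_Practice_Problems/Valid_Palindrome_IV.py | check_valid_palindrome
-- ===== SOURCE A (Python) =====
-- def check_valid_palindrome(s:str)->bool:
--     left=0
--     right=len(s)-1
--
--     count_mismatch=0
--     while left<right:
--         if s[left]!=s[right]:
--             count_mismatch+=1
--         left+=1
--         right-=1
--
--     return False if count_mismatch>2 else True
-- ===== SOURCE B (Python) =====
-- def check_valid_palindrome(s: str) -> bool:
--     r = s[::-1]
--     count = sum(1 for a, b in zip(s, r) if a != b)
--     return count <= 4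
-- ===== Notes on version B (the rewrite author's own statement) =====
-- stated objective: idiomatic
-- what changed: B compares the whole string elementwise against its reversed copy and tests the full mismatch count <= 4 (each off-center mismatch is counted twice), instead of A's two-pointer half-length sweep with threshold 2.
import Mathlib
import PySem

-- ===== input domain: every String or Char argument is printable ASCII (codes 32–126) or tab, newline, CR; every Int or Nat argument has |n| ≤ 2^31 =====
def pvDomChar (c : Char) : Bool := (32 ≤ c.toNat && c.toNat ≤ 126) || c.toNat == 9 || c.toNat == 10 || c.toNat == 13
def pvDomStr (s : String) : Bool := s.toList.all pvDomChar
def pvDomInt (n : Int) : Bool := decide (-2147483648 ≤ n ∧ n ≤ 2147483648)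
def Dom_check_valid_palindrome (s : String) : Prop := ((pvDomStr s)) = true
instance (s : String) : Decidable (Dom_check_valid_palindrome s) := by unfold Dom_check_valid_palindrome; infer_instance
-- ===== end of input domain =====

-- B compares the whole string elementwise with its reversed copy and tests the full
-- mismatch count ≤ 4 (each off-center mismatch is counted twice), instead of A's
-- two-pointer half-length sweep with threshold 2; objective: more idiomatic.

-- ===== PORT A =====
-- A's while loop: two indices moving inwards, counting mismatched pairs.
-- (Python's right = len(s)-1 can be -1 on the empty string; with Nat subtraction it is 0,
--  and in both cases the loop body never runs, so the truncation is behaviour-exact.)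
def avAux (l : List Char) (left right count : Nat) : Nat :=
  if left < right then
    avAux l (left + 1) (right - 1)
      (count + if l.getD left ' ' ≠ l.getD right ' ' then 1 else 0)
  else count
termination_by right - left

def check_valid_palindrome (s : String) : Bool :=
  let l := s.toList
  if avAux l 0 (l.length - 1) 0 > 2 then false else true

-- ===== PORT B =====
def check_valid_palindrome_alt (s : String) : Bool :=
  let l := s.toList
  let r := l.reverse
  let count := (l.zip r).countP (fun p => p.1 != p.2)
  decide (count ≤ 4)

-- ===== PRECONDITION & SPEC =====
def Spec_check_valid_palindrome (s : String) (out : Bool) : Prop := out = check_valid_palindrome_alt s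
instance (s : String) (out : Bool) : Decidable (Spec_check_valid_palindrome s out) := by unfold Spec_check_valid_palindrome; infer_instance

-- ===== CLAIM (what is proved, stated in full; the proofs are below) =====
def Claim_equal_check_valid_palindrome : Prop := ∀ (s : String), Dom_check_valid_palindrome s → Spec_check_valid_palindrome s (check_valid_palindrome s)

-- ===== LEMMAS AND PROOFS =====

-- Closed loop result when the pointers have met or crossed.
theorem avAux_stop (l : List Char) (left right count : Nat) (h : ¬ left < right) :
    avAux l left right count = count := by
  rw [avAux]; simp [h]

-- The accumulator is purely additive.
theorem avAux_add (l : List Char) :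
    ∀ n left right count, right - left ≤ n →
      avAux l left right count = count + avAux l left right 0 := by
  intro n
  induction n with
  | zero =>
    intro left right count h
    have hlt : ¬ left < right := by omega
    rw [avAux_stop l left right count hlt, avAux_stop l left right 0 hlt]
    omega
  | succ n ih =>
    intro left right count h
    by_cases hlt : left < right
    · conv_lhs => rw [avAux]
      conv_rhs => rw [avAux]
      simp only [hlt, if_true]
      set x : Nat := if l.getD left ' ' ≠ l.getD right ' ' then 1 else 0 with hx
      have h1 := ih (left + 1) (right - 1) (count + x) (by omega)
      have h2 := ih (left + 1) (right - 1) (0 + x) (by omega)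
      rw [h1, h2]
      omega
    · rw [avAux_stop l left right count hlt, avAux_stop l left right 0 hlt]
      omega

-- Running the loop on a :: (m ++ [b]) with both indices shifted by one is the loop on m.
theorem avAux_shift (a b : Char) (m : List Char) :
    ∀ n left right count, right - left ≤ n → right < m.length →
      avAux (a :: (m ++ [b])) (left + 1) (right + 1) count = avAux m left right count := by
  intro n
  induction n with
  | zero =>
    intro left right count h hr
    have hlt : ¬ left < right := by omega
    rw [avAux_stop _ _ _ _ (by omega : ¬ left + 1 < right + 1),
        avAux_stop m left right count hlt]
  | succ n ih =>
    intro left right count h hr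
    by_cases hlt : left < right
    · have hgl : (a :: (m ++ [b])).getD (left + 1) ' ' = m.getD left ' ' := by
        have hl : left < m.length := by omega
        simp [List.getD, List.getElem?_append_left hl]
      have hgr : (a :: (m ++ [b])).getD (right + 1) ' ' = m.getD right ' ' := by
        simp [List.getD, List.getElem?_append_left hr]
      conv_lhs => rw [avAux]
      conv_rhs => rw [avAux]
      rw [if_pos (by omega : left + 1 < right + 1), if_pos hlt, hgl, hgr]
      rw [show right + 1 - 1 = right - 1 + 1 from by omega]
      exact ih (left + 1) (right - 1) _ (by omega) (by omega)
    · rw [avAux_stop _ _ _ _ (by omega : ¬ left + 1 < right + 1),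
        avAux_stop m left right count hlt]

theorem bne_symm_char (a b : Char) : (a != b) = (b != a) := by
  simp [bne]
  exact eq_comm

-- Core: the full-length mismatch count against the reverse is exactly twice A's count.
theorem countP_zip_reverse_eq (l : List Char) :
    (l.zip l.reverse).countP (fun p => p.1 != p.2) = 2 * avAux l 0 (l.length - 1) 0 := by
  induction l using List.bidirectionalRec with
  | nil => rw [avAux_stop _ _ _ _ (by simp)]; rfl
  | singleton a => rw [avAux_stop _ _ _ _ (by simp)]; simp
  | cons_append a m b ih =>
    have hzip : ((a :: (m ++ [b])).zip (a :: (m ++ [b])).reverse) =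
        (a, b) :: (m.zip m.reverse ++ [(b, a)]) := by
      have hrev : (a :: (m ++ [b])).reverse = b :: (m.reverse ++ [a]) := by simp
      rw [hrev, List.zip_cons_cons, List.zip_append (by simp)]
      simp
    have hga : (a :: (m ++ [b])).getD 0 ' ' = a := rfl
    have hgb : (a :: (m ++ [b])).getD (m.length + 1) ' ' = b := by
      show ((a :: m) ++ [b]).getD (m.length + 1) ' ' = b
      rw [List.getD_eq_getElem?_getD, List.getElem?_append_right (by simp)]
      simp
    have hlen : (a :: (m ++ [b])).length - 1 = m.length + 1 := by simp
    rw [hzip, hlen]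
    conv_rhs => rw [avAux]
    rw [if_pos (by omega : 0 < m.length + 1), hga, hgb]
    set x : Nat := if a ≠ b then 1 else 0 with hx
    have hcount : ((a, b) :: (m.zip m.reverse ++ [(b, a)])).countP (fun p => p.1 != p.2)
        = x + (m.zip m.reverse).countP (fun p => p.1 != p.2) + x := by
      rw [List.countP_cons, List.countP_append]
      have h2 : ([(b, a)].countP fun (p : Char × Char) => p.1 != p.2)
          = if (a != b) then 1 else 0 := by
        rw [List.countP_singleton]
        show (if (b != a) = true then 1 else 0) = _
        rw [bne_symm_char b a]
      rw [h2]
      by_cases h : a = b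
      · simp [h, hx]
      · simp [h, hx]; omega
    rw [hcount, ih]
    rcases m with _ | ⟨c, m'⟩
    · -- m = []: the inner loop runs zero times on both sides
      rw [avAux_stop _ _ _ _ (by simp), avAux_stop _ _ _ _ (by simp)]
      omega
    · -- m nonempty: shift the indices, peel the accumulator
      have hL : avAux (a :: ((c :: m') ++ [b])) (0 + 1) (m'.length + 1)
          ((0 : Nat) + x) = avAux (c :: m') 0 m'.length ((0 : Nat) + x) :=
        avAux_shift a b (c :: m') (m'.length) 0 m'.length ((0 : Nat) + x)
          (by omega) (by simp)
      rw [show (c :: m').length + 1 - 1 = m'.length + 1 from by simp]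
      rw [hL, avAux_add (c :: m') m'.length 0 m'.length ((0 : Nat) + x) (by omega)]
      rw [show (c :: m').length - 1 = m'.length from by simp]
      omega

-- ===== VERDICT (by name: the statement is the Claim_ definition above) =====
theorem check_valid_palindrome_spec : Claim_equal_check_valid_palindrome := by
  intro s _
  unfold Spec_check_valid_palindrome check_valid_palindrome check_valid_palindrome_alt
  dsimp only
  rw [countP_zip_reverse_eq]
  by_cases h : avAux s.toList 0 (s.toList.length - 1) 0 > 2
  · rw [if_pos h]
    symm
    rw [decide_eq_false_iff_not]
    omega
  · rw [if_neg h]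
    symm
    rw [decide_eq_true_eq]
    omega
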